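-- pv_equiv track=rewrite | github.com/AtanuMM/python-excel-mongodb-script-angelShot | mainV1.4.py | expand_days_range
-- ===== SOURCE A (Python) =====
-- DAY_MAP = {
--     "Mon": "Monday",
--     "Tue": "Tuesday",
--     "Wed": "Wednesday",
--     "Thu": "Thursday",
--     "Fri": "Friday",
--     "Sat": "Saturday",
--     "Sun": "Sunday"
-- }
--
-- def expand_days_range(start, end):
--     keys = list(DAY_MAP.keys())
--     try:
--         start_idx = keys.index(start)
--         end_idx = keys.index(end)
--     except ValueError:
--         return []
--
--     if start_idx <= end_idx:
--         return [DAY_MAP[k] for k in keys[start_idx:end_idx+1]]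
--     return [DAY_MAP[k] for k in (keys[start_idx:] + keys[:end_idx+1])]
-- ===== SOURCE B (Python) =====
-- DAY_MAP = {
--     "Mon": "Monday",
--     "Tue": "Tuesday",
--     "Wed": "Wednesday",
--     "Thu": "Thursday",
--     "Fri": "Friday",
--     "Sat": "Saturday",
--     "Sun": "Sunday"
-- }
--
-- _FULL = list(DAY_MAP.values())
-- _POS = {abbr: i for i, abbr in enumerate(DAY_MAP)}
--
-- def expand_days_range(start, end):
--     try:
--         si = _POS[start]
--         ei = _POS[end]
--     except KeyError:
--         return []
--     n = (ei - si) % 7 + 1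
--     return [_FULL[(si + i) % 7] for i in range(n)]
-- ===== Notes on version B (the rewrite author's own statement) =====
-- stated objective: alternative
-- what changed: B replaces A's per-call key-list scan with slice-concatenate and a wrap/no-wrap branch by precomputed position/value tables and a single branch-free modular loop: n = (ei - si) % 7 + 1 elements taken as _FULL[(si + i) % 7].
import Mathlib
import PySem

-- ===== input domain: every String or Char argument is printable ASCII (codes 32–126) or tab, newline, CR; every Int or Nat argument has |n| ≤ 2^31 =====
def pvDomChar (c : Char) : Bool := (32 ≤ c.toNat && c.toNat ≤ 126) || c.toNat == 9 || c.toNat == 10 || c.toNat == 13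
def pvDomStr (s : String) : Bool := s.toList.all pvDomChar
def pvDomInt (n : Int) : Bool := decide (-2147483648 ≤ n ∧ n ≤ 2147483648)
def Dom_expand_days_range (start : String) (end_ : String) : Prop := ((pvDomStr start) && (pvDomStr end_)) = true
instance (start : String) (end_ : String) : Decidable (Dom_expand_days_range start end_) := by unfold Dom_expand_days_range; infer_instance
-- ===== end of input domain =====

-- B replaces A's slice-concatenate with wrap/no-wrap branch by precomputed tables and one branch-free modular loop (alternative decomposition; no speed claim).

-- ===== PORT A =====
-- DAY_MAP as an insertion-ordered dict
def dayMapA : PySem.Dict String String :=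
  PySem.Dict.ofList [("Mon","Monday"),("Tue","Tuesday"),("Wed","Wednesday"),
                     ("Thu","Thursday"),("Fri","Friday"),("Sat","Saturday"),("Sun","Sunday")]

-- try/except ValueError around two .index calls → Option match; DAY_MAP[k] with k drawn
-- from keys always succeeds, so the getD default "" is never used.
def expand_days_range (start : String) (end_ : String) : List String :=
  let keys := PySem.Dict.keys dayMapA
  match PySem.List.index? keys start, PySem.List.index? keys end_ with
  | some start_idx, some end_idx =>
    if start_idx ≤ end_idx then
      (PySem.List.slice keys (some (start_idx : Int)) (some ((end_idx : Int) + 1))).map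
        (fun k => (PySem.Dict.get? dayMapA k).getD "")
    else
      (PySem.List.slice keys (some (start_idx : Int)) none
        ++ PySem.List.slice keys none (some ((end_idx : Int) + 1))).map
        (fun k => (PySem.Dict.get? dayMapA k).getD "")
  | _, _ => []

-- ===== PORT B =====
def fullB : List String := ["Monday","Tuesday","Wednesday","Thursday","Friday","Saturday","Sunday"]

def posB : PySem.Dict String Int :=
  PySem.Dict.ofList [("Mon",0),("Tue",1),("Wed",2),("Thu",3),("Fri",4),("Sat",5),("Sun",6)]

-- try/except KeyError around two dict lookups → Option match; fullB index is always in
-- range 0..6, so the pyGetD default "" is never used.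
def expand_days_range_alt (start : String) (end_ : String) : List String :=
  match PySem.Dict.get? posB start with
  | none => []
  | some si =>
    match PySem.Dict.get? posB end_ with
    | none => []
    | some ei =>
      let n := PySem.Int.mod (ei - si) 7 + 1
      (PySem.List.pyRange 0 n 1).map (fun i => PySem.List.pyGetD fullB (PySem.Int.mod (si + i) 7) "")

-- ===== PRECONDITION & SPEC =====
def Spec_expand_days_range (start : String) (end_ : String) (out : List String) : Prop := out = expand_days_range_alt start end_
instance (start : String) (end_ : String) (out : List String) : Decidable (Spec_expand_days_range start end_ out) := by unfold Spec_expand_days_range; infer_instance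

-- ===== CLAIM (what is proved, stated in full; the proofs are below) =====
def Claim_equal_expand_days_range : Prop := ∀ (start : String) (end_ : String), Dom_expand_days_range start end_ → Spec_expand_days_range start end_ (expand_days_range start end_)

-- ===== LEMMAS AND PROOFS =====

-- Every string is one of the seven day keys, or none of them.
lemma day_key_cases (s : String) :
    s = "Mon" ∨ s = "Tue" ∨ s = "Wed" ∨ s = "Thu" ∨ s = "Fri" ∨ s = "Sat" ∨ s = "Sun" ∨
    (s ≠ "Mon" ∧ s ≠ "Tue" ∧ s ≠ "Wed" ∧ s ≠ "Thu" ∧ s ≠ "Fri" ∧ s ≠ "Sat" ∧ s ≠ "Sun") := by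
  by_cases h1 : s = "Mon" <;> by_cases h2 : s = "Tue" <;> by_cases h3 : s = "Wed" <;>
  by_cases h4 : s = "Thu" <;> by_cases h5 : s = "Fri" <;> by_cases h6 : s = "Sat" <;>
  by_cases h7 : s = "Sun" <;> tauto

lemma keys_dayMapA :
    PySem.Dict.keys dayMapA = ["Mon","Tue","Wed","Thu","Fri","Sat","Sun"] := by decide

lemma posB_mk :
    posB = PySem.Dict.mk [("Mon",0),("Tue",1),("Wed",2),("Thu",3),("Fri",4),("Sat",5),("Sun",6)] := by
  decide

-- If s is not a day key, A's index lookup fails.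
lemma indexA_none {s : String}
    (h : s ≠ "Mon" ∧ s ≠ "Tue" ∧ s ≠ "Wed" ∧ s ≠ "Thu" ∧ s ≠ "Fri" ∧ s ≠ "Sat" ∧ s ≠ "Sun") :
    PySem.List.index? (PySem.Dict.keys dayMapA) s = none := by
  obtain ⟨h1, h2, h3, h4, h5, h6, h7⟩ := h
  rw [PySem.List.index?_eq_none_iff, keys_dayMapA]
  simp [h1, h2, h3, h4, h5, h6, h7]

-- If s is not a day key, B's dict lookup fails.
lemma posB_none {s : String}
    (h : s ≠ "Mon" ∧ s ≠ "Tue" ∧ s ≠ "Wed" ∧ s ≠ "Thu" ∧ s ≠ "Fri" ∧ s ≠ "Sat" ∧ s ≠ "Sun") :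
    PySem.Dict.get? posB s = none := by
  obtain ⟨h1, h2, h3, h4, h5, h6, h7⟩ := h
  rw [posB_mk]
  simp [PySem.Dict.get?_mk_cons, Ne.symm h1, Ne.symm h2, Ne.symm h3, Ne.symm h4,
        Ne.symm h5, Ne.symm h6, Ne.symm h7]
  rfl

-- ===== VERDICT (by name: the statement is the Claim_ definition above) =====
theorem expand_days_range_spec : Claim_equal_expand_days_range := by
  intro start end_ _
  unfold Spec_expand_days_range
  rcases day_key_cases start with hs | hs | hs | hs | hs | hs | hs | hs <;>
  rcases day_key_cases end_ with he | he | he | he | he | he | he | he <;>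
  first
  | (subst hs; subst he; decide)
  | (try subst hs
     try subst he
     simp only [expand_days_range, expand_days_range_alt]
     try rw [indexA_none hs, posB_none hs]
     try rw [indexA_none he, posB_none he]
     try rfl)
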